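-- pv_equiv track=rewrite | github.com/ivanwakeup/algorithms | algorithms/prep/microsoft/largest_x_occurs_x_times.py | largest_x_occurs
-- ===== SOURCE A (Python) =====
-- from collections import defaultdict
--
-- def largest_x_occurs(nums):
--     hm = defaultdict(int)
--     result = 0
--     for num in nums:
--         hm[num]+=1
--         if hm[num] == num:
--             result = max(num, result)
--     return result
-- ===== SOURCE B (Python) =====
-- def largest_x_occurs(nums):
--     s = sorted(nums, reverse=True)
--     i = 0
--     while i < len(s):
--         v = s[i]
--         run = 1
--         while i + run < len(s) and s[i + run] == v:
--             run += 1
--         if v >= 1 and run >= v: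
--             return v
--         i += run
--     return 0
-- ===== Notes on version B (the rewrite author's own statement) =====
-- stated objective: alternative
-- what changed: Replaces A's hash-map counting pass by sorting the list in descending order and scanning equal-value runs, returning early at the first (hence largest) value v>=1 whose run length is at least v; no frequency map is built.
import Mathlib
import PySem

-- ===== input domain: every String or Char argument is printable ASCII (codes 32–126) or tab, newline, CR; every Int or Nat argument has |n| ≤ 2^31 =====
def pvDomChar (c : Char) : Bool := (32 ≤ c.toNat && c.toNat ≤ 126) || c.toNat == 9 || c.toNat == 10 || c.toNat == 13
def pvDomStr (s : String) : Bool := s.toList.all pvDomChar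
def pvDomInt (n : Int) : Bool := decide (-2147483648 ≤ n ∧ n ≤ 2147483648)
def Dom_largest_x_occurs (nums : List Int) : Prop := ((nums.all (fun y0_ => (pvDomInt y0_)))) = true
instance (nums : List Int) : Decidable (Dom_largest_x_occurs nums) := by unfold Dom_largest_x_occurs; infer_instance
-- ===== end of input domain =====

-- B replaces A's hash-map counting pass by sorting nums in descending order and
-- scanning equal-value runs, returning at the first value v >= 1 whose run length is >= v.


-- ===== PORT A =====
-- one step of A's loop: hm[num] += 1; if hm[num] == num: result = max(num, result)
def aStep (st : PySem.Dict Int Int × Int) (num : Int) : PySem.Dict Int Int × Int :=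
  let hm := st.1.modify num 0 (· + 1)
  if hm.getD num 0 = num then (hm, max num st.2) else (hm, st.2)

def largest_x_occurs (nums : List Int) : Int :=
  (nums.foldl aStep (PySem.Dict.empty, 0)).2

-- ===== PORT B =====
-- B's outer while loop over the descending-sorted list, one call per run:
-- run = 1 + (inner while loop counting equal neighbours) = 1 + |takeWhile (== v) t|;
-- advancing i by run is taking the suffix after the run, i.e. dropWhile (== v) t.
def bScan (s : List Int) : Int :=
  match s with
  | [] => 0
  | v :: t =>
    let run : Int := 1 + ((t.takeWhile (fun x => x == v)).length : Int)
    if 1 ≤ v ∧ v ≤ run then v else bScan (t.dropWhile (fun x => x == v))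
termination_by s.length
decreasing_by
  simp only [List.length_cons]
  exact Nat.lt_succ_of_le (List.length_dropWhile_le _ _)

def largest_x_occurs_alt (nums : List Int) : Int :=
  bScan (PySem.List.sorted nums (fun x => x) true)

-- ===== PRECONDITION & SPEC =====
def Spec_largest_x_occurs (nums : List Int) (out : Int) : Prop := out = largest_x_occurs_alt nums
instance (nums : List Int) (out : Int) : Decidable (Spec_largest_x_occurs nums out) := by unfold Spec_largest_x_occurs; infer_instance

-- ===== CLAIM (what is proved, stated in full; the proofs are below) =====
def Claim_equal_largest_x_occurs : Prop := ∀ (nums : List Int), Dom_largest_x_occurs nums → Spec_largest_x_occurs nums (largest_x_occurs nums)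

-- ===== LEMMAS AND PROOFS =====

-- Both results are characterised (uniquely) by: nonnegative, an upper bound for every
-- positive x occurring at least x times, and itself 0 or such an x.
def Qchar (nums : List Int) (r : Int) : Prop :=
  0 ≤ r ∧ (∀ x : Int, 1 ≤ x → x ≤ (List.count x nums : Int) → x ≤ r) ∧
    (r = 0 ∨ (1 ≤ r ∧ r ≤ (List.count r nums : Int)))

lemma Qchar_unique {nums : List Int} {r1 r2 : Int}
    (h1 : Qchar nums r1) (h2 : Qchar nums r2) : r1 = r2 := by
  obtain ⟨h10, h1ub, h1mem⟩ := h1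
  obtain ⟨h20, h2ub, h2mem⟩ := h2
  have hle : r1 ≤ r2 := by
    rcases h1mem with h | ⟨ha, hb⟩
    · omega
    · exact h2ub r1 ha hb
  have hge : r2 ≤ r1 := by
    rcases h2mem with h | ⟨ha, hb⟩
    · omega
    · exact h1ub r2 ha hb
  omega

lemma Qchar_perm {l1 l2 : List Int} (hp : l1.Perm l2) {r : Int}
    (h : Qchar l1 r) : Qchar l2 r := by
  obtain ⟨h0, hub, hmem⟩ := h
  refine ⟨h0, ?_, ?_⟩
  · intro x hx1 hxc
    exact hub x hx1 (by rw [hp.count_eq]; exact hxc)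
  · rcases hmem with h | ⟨ha, hb⟩
    · exact Or.inl h
    · exact Or.inr ⟨ha, by rw [← hp.count_eq]; exact hb⟩

lemma A_loop_inv (l : List Int) :
    ∀ (p : List Int) (r : Int), Qchar p r →
      Qchar (p ++ l) ((l.foldl aStep (PySem.Dict.counter p, r)).2) := by
  induction l with
  | nil => intro p r h; simpa using h
  | cons num t ih =>
    intro p r h
    obtain ⟨h0, hub, hmem⟩ := h
    have hdict : (PySem.Dict.counter p).modify num 0 (· + 1) = PySem.Dict.counter (p ++ [num]) :=
      (PySem.Dict.counter_append_singleton p num).symm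
    have hcnt : (PySem.Dict.counter (p ++ [num])).getD num 0 = (List.count num p : Int) + 1 := by
      rw [PySem.Dict.getD_counter]
      simp
    have hfold : List.foldl aStep (PySem.Dict.counter p, r) (num :: t)
        = List.foldl aStep (aStep (PySem.Dict.counter p, r) num) t := rfl
    have haStep : aStep (PySem.Dict.counter p, r) num
        = (PySem.Dict.counter (p ++ [num]),
            if (List.count num p : Int) + 1 = num then max num r else r) := by
      simp only [aStep, hdict, hcnt]
      split_ifs <;> rfl
    rw [hfold, haStep]
    have hnext : Qchar (p ++ [num])
        (if (List.count num p : Int) + 1 = num then max num r else r) := by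
      have hcx : ∀ x : Int, (List.count x (p ++ [num]) : Int)
          = (List.count x p : Int) + (if x = num then 1 else 0) := by
        intro x
        rcases eq_or_ne x num with hx | hx
        · subst hx; simp [List.count_append]
        · simp [List.count_append, hx, Ne.symm hx]
      split_ifs with hfire
      · refine ⟨by omega, ?_, ?_⟩
        · intro x hx1 hxc
          rw [hcx] at hxc
          by_cases hxe : x = num
          · subst hxe; exact le_max_left _ _
          · simp [hxe] at hxc
            exact le_trans (hub x hx1 hxc) (le_max_right _ _)
        · rcases le_total r num with hr | hr
          · right
            have hm : max num r = num := max_eq_left hr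
            rw [hm, hcx]
            simp
            omega
          · have hm : max num r = r := max_eq_right hr
            rw [hm]
            rcases hmem with h | ⟨ha, hb⟩
            · omega
            · right
              refine ⟨ha, ?_⟩
              rw [hcx r]
              split_ifs <;> omega
      · refine ⟨h0, ?_, ?_⟩
        · intro x hx1 hxc
          rw [hcx] at hxc
          by_cases hxe : x = num
          · subst hxe
            simp at hxc
            have : x ≤ (List.count x p : Int) := by omega
            exact hub x hx1 this
          · simp [hxe] at hxc
            exact hub x hx1 hxc
        · rcases hmem with h | ⟨ha, hb⟩
          · exact Or.inl h
          · right
            refine ⟨ha, ?_⟩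
            rw [hcx r]
            split_ifs <;> omega
    have := ih (p ++ [num]) _ hnext
    simpa [List.append_assoc] using this

lemma A_Qchar (nums : List Int) : Qchar nums (largest_x_occurs nums) := by
  have h0 : Qchar [] (0 : Int) := by
    refine ⟨le_refl _, ?_, Or.inl rfl⟩
    intro x hx1 hxc
    simp at hxc
    omega
  have := A_loop_inv nums [] 0 h0
  simpa [largest_x_occurs, PySem.Dict.counter] using this

-- in a descending list whose every element is ≤ v, everything past the leading
-- run of v's is strictly below v
lemma dropWhile_lt (v : Int) :
    ∀ t : List Int, t.Pairwise (fun a b => b ≤ a) → (∀ x ∈ t, x ≤ v) →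
      ∀ x ∈ t.dropWhile (fun x => x == v), x < v := by
  intro t
  induction t with
  | nil => intro _ _ x hx; simp at hx
  | cons a t' ih =>
    intro hp hle x hx
    by_cases ha : a = v
    · subst ha
      rw [List.dropWhile_cons_of_pos (by simp)] at hx
      exact ih (List.pairwise_cons.mp hp).2
        (fun y hy => le_trans ((List.pairwise_cons.mp hp).1 y hy) (hle a (by simp))) x hx
    · rw [List.dropWhile_cons_of_neg (by simp [ha])] at hx
      have hav : a < v := lt_of_le_of_ne (hle a (by simp)) ha
      rcases List.mem_cons.mp hx with h | h
      · omega
      · exact lt_of_le_of_lt ((List.pairwise_cons.mp hp).1 x h) hav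

lemma takeWhile_count (v : Int) (t : List Int) :
    ∀ x : Int, List.count x (t.takeWhile (fun x => x == v)) =
      if x = v then (t.takeWhile (fun x => x == v)).length else 0 := by
  intro x
  have hrep : t.takeWhile (fun x => x == v) =
      List.replicate (t.takeWhile (fun x => x == v)).length v := by
    apply List.eq_replicate_of_mem
    intro y hy
    simpa using List.mem_takeWhile_imp hy
  rw [hrep]
  split_ifs with h
  · subst h; simp
  · simp [List.count_replicate, Ne.symm h]

lemma bScan_Qchar : ∀ (n : Nat) (s : List Int), s.length ≤ n →
    s.Pairwise (fun a b => b ≤ a) → Qchar s (bScan s) := by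
  intro n
  induction n with
  | zero =>
    intro s hlen _
    have : s = [] := List.eq_nil_of_length_eq_zero (Nat.le_zero.mp hlen)
    subst this
    have hz : bScan ([] : List Int) = 0 := by rw [bScan]
    rw [hz]
    refine ⟨le_refl _, ?_, Or.inl rfl⟩
    intro x hx1 hxc
    simp at hxc
    omega
  | succ m ih =>
    intro s hlen hp
    match s with
    | [] =>
      have hz : bScan ([] : List Int) = 0 := by rw [bScan]
      rw [hz]
      refine ⟨le_refl _, ?_, Or.inl rfl⟩
      intro x hx1 hxc
      simp at hxc
      omega
    | v :: t =>
      have hple := List.pairwise_cons.mp hp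
      set tw := t.takeWhile (fun x => x == v) with htw
      set dw := t.dropWhile (fun x => x == v) with hdw
      have hsplit : t = tw ++ dw := (List.takeWhile_append_dropWhile).symm
      set run : Int := 1 + (tw.length : Int) with hrun
      have hdwlt : ∀ x ∈ dw, x < v :=
        dropWhile_lt v t hple.2 hple.1
      -- counts in v :: t
      have h2 : List.count v dw = 0 := by
        rw [List.count_eq_zero]
        intro h
        exact absurd (hdwlt v h) (lt_irrefl v)
      have hcv : (List.count v (v :: t) : Int) = run := by
        have h1 : List.count v tw = tw.length := by
          rw [htw, takeWhile_count]; simp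
        have hc : List.count v (v :: t) = tw.length + 1 := by
          rw [hsplit]
          simp [List.count_append, h1, h2]
        rw [hc, hrun]; push_cast; ring
      have hcx : ∀ x : Int, x ≠ v → (List.count x (v :: t) : Int) = (List.count x dw : Int) := by
        intro x hx
        have h1 : List.count x tw = 0 := by
          rw [htw, takeWhile_count, if_neg hx]
        have hc : List.count x (v :: t) = List.count x dw := by
          rw [hsplit]
          simp [List.count_append, h1, Ne.symm hx]
        rw [hc]
      -- unfold one step of bScan
      have hstep : bScan (v :: t) = if 1 ≤ v ∧ v ≤ run then v else bScan dw := by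
        rw [bScan]
      rw [hstep]
      split_ifs with hfire
      · refine ⟨by omega, ?_, Or.inr ⟨hfire.1, by rw [hcv]; exact hfire.2⟩⟩
        intro x hx1 hxc
        by_cases hxe : x = v
        · omega
        · rw [hcx x hxe] at hxc
          have : 0 < List.count x dw := by omega
          exact le_of_lt (hdwlt x (List.count_pos_iff.mp this))
      · have hdwp : dw.Pairwise (fun a b => b ≤ a) :=
          hple.2.sublist (List.dropWhile_sublist _)
        have hdwlen : dw.length ≤ m := by
          have h := List.length_dropWhile_le (fun x => x == v) t
          rw [← hdw] at h
          simp only [List.length_cons] at hlen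
          omega
        obtain ⟨h0, hub, hmem⟩ := ih dw hdwlen hdwp
        refine ⟨h0, ?_, ?_⟩
        · intro x hx1 hxc
          by_cases hxe : x = v
          · subst hxe
            rw [hcv] at hxc
            exact absurd ⟨hx1, hxc⟩ hfire
          · rw [hcx x hxe] at hxc
            exact hub x hx1 hxc
        · rcases hmem with h | ⟨ha, hb⟩
          · exact Or.inl h
          · right
            refine ⟨ha, ?_⟩
            have hmemdw : bScan dw ∈ dw := by
              apply List.count_pos_iff.mp
              omega
            have hne : bScan dw ≠ v := ne_of_lt (hdwlt _ hmemdw)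
            rw [hcx _ hne]
            exact hb

lemma B_Qchar (nums : List Int) : Qchar nums (largest_x_occurs_alt nums) := by
  have hperm : (PySem.List.sorted nums (fun x => x) true).Perm nums :=
    PySem.List.sorted_perm nums (fun x => x) true
  have hpair : (PySem.List.sorted nums (fun x => x) true).Pairwise (fun a b => b ≤ a) := by
    simpa using PySem.List.sorted_pairwise_rev nums (fun x => x)
  have := bScan_Qchar (PySem.List.sorted nums (fun x => x) true).length _ (le_refl _) hpair
  exact Qchar_perm hperm this

-- ===== VERDICT (by name: the statement is the Claim_ definition above) =====
theorem largest_x_occurs_spec : Claim_equal_largest_x_occurs := by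
  intro nums _
  exact Qchar_unique (A_Qchar nums) (B_Qchar nums)
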